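-- pv_equiv track=rewrite | github.com/pypi-data/pypi-mirror-353 | packages/uuidtool/uuidtool-1.4-py3-none-any.whl/uuidtool/utils.py | alt_sort
-- ===== SOURCE A (Python) =====
-- def alt_sort(timestamps: list[int]) -> list[int]:
--     """Sort a list of timestamps in an alternating pattern.
--     This function assumes that the timestamps are already sorted in ascending order.
--
--     Args:
--         timestamps (list[int]): The timestamps to sort
--
--     Returns:
--         list[int]: The sorted timestamps
--     """
--     out = []
--     size = len(timestamps)
--     if len(timestamps) % 2 != 0:
--         idx = size // 2
--         out.append(timestamps[idx])
--         i1, i2 = idx - 1, idx + 1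
--     else:
--         idx = size // 2
--         i1, i2 = idx - 1, idx
--
--     while i1 >= 0:
--         out.append(timestamps[i1])
--         if i2 < size:
--             out.append(timestamps[i2])
--         i1 -= 1
--         i2 += 1
--
--     return out
-- ===== SOURCE B (Python) =====
-- def alt_sort(timestamps):
--     n = len(timestamps)
--     mid = n // 2
--     left = timestamps[:mid][::-1]
--     if n % 2 != 0:
--         right = timestamps[mid + 1:]
--         return [timestamps[mid]] + [x for p in zip(left, right) for x in p]
--     right = timestamps[mid:]
--     return [x for p in zip(left, right) for x in p]
-- ===== Notes on version B (the rewrite author's own statement) =====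
-- stated objective: alternative
-- what changed: Replaces A's index-based while loop walking two cursors outward from the midpoint with a slice-based decomposition: reverse the left half, take the right half, and interleave them pairwise via zip (prepending the center element when the length is odd).
import Mathlib
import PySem

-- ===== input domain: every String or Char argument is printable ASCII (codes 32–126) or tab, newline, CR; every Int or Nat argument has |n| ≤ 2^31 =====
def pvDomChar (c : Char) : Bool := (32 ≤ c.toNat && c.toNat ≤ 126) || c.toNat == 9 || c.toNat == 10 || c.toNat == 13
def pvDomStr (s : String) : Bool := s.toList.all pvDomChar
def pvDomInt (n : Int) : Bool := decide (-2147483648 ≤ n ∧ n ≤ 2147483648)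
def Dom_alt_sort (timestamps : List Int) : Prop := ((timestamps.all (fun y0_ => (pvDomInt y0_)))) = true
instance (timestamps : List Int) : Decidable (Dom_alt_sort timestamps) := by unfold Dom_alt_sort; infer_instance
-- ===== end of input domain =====

-- B replaces A's two-cursor while loop with a slice-based decomposition (reversed left half
-- interleaved with the right half, center prepended when the length is odd); same cost.

-- ===== PORT A =====
-- the while loop of A; the indices accessed are always in range (proved in the lemmas below),
-- so `(pyGet? …).getD 0` is exact here
def altLoop (ts : List Int) (size : Int) (i1 : Int) (i2 : Int) (out : List Int) : List Int :=
  if _h : 0 ≤ i1 then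
    let out := out ++ [(PySem.List.pyGet? ts i1).getD 0]
    let out := if i2 < size then out ++ [(PySem.List.pyGet? ts i2).getD 0] else out
    altLoop ts size (i1 - 1) (i2 + 1) out
  else out
termination_by (i1 + 1).toNat
decreasing_by omega

-- `size` is nonnegative, so Lean's `/` and `%` coincide with Python's `//` and `%` here
def alt_sort (timestamps : List Int) : List Int :=
  let size : Int := timestamps.length
  if size % 2 ≠ 0 then
    let idx := size / 2
    let out := [(PySem.List.pyGet? timestamps idx).getD 0]
    altLoop timestamps size (idx - 1) (idx + 1) out
  else
    let idx := size / 2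
    altLoop timestamps size (idx - 1) idx []

-- ===== PORT B =====
-- zip-then-flatten: [x for p in zip(l, r) for x in p]
def interleave : List Int → List Int → List Int
  | a :: l, b :: r => a :: b :: interleave l r
  | _, _ => []

def alt_sort_alt (timestamps : List Int) : List Int :=
  let n := timestamps.length
  let mid := n / 2
  let left := (timestamps.take mid).reverse
  if n % 2 ≠ 0 then
    (PySem.List.pyGet? timestamps (mid : Int)).getD 0 :: interleave left (timestamps.drop (mid + 1))
  else
    interleave left (timestamps.drop mid)

-- ===== PRECONDITION & SPEC =====
def Spec_alt_sort (timestamps : List Int) (out : List Int) : Prop := out = alt_sort_alt timestamps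
instance (timestamps : List Int) (out : List Int) : Decidable (Spec_alt_sort timestamps out) := by unfold Spec_alt_sort; infer_instance

-- ===== CLAIM (what is proved, stated in full; the proofs are below) =====
def Claim_equal_alt_sort : Prop := ∀ (timestamps : List Int), Dom_alt_sort timestamps → Spec_alt_sort timestamps (alt_sort timestamps)

-- ===== LEMMAS AND PROOFS =====

-- the loop with i1 = j-1, i2 = n-j produces the interleaving of the reversed first j
-- elements with the last j elements
lemma altLoop_eq (ts : List Int) (j : Nat) (acc : List Int)
    (h : 2 * j ≤ ts.length) :
    altLoop ts (ts.length : Int) ((j : Int) - 1) ((ts.length - j : Nat) : Int) acc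
      = acc ++ interleave ((ts.take j).reverse) (ts.drop (ts.length - j)) := by
  induction j generalizing acc with
  | zero =>
    rw [altLoop.eq_def]
    simp [interleave]
  | succ j ih =>
    rw [altLoop.eq_def]
    have hjlt : j < ts.length := by omega
    have hi2 : ts.length - (j + 1) < ts.length := by omega
    have h1 : ((j : Int) + 1 - 1) = (j : Int) := by ring
    simp only [show (0:Int) ≤ (j+1:Nat) - 1 by push_cast; omega, dif_pos]
    have e1 : PySem.List.pyGet? ts ((j + 1 : Nat) - 1 : Int) = some ts[j] := by
      have : ((j + 1 : Nat) - 1 : Int) = ((j : Nat) : Int) := by push_cast; ring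
      rw [this, PySem.List.pyGet?_natCast]
      simp [hjlt]
    have e2 : PySem.List.pyGet? ts ((ts.length - (j+1) : Nat) : Int)
        = some ts[ts.length - (j+1)] := by
      rw [PySem.List.pyGet?_natCast]
      simp [hi2]
    rw [e1, e2]
    simp only [show ((ts.length - (j+1) : Nat) : Int) < (ts.length : Int) by
      push_cast [Nat.cast_sub (by omega : j + 1 ≤ ts.length)]; omega, if_pos]
    have harg1 : ((j + 1 : Nat) - 1 - 1 : Int) = ((j : Int) - 1) := by push_cast; ring
    have harg2 : (((ts.length - (j+1) : Nat) : Int) + 1) = ((ts.length - j : Nat) : Int) := by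
      push_cast [Nat.cast_sub (by omega : j + 1 ≤ ts.length),
        Nat.cast_sub (by omega : j ≤ ts.length)]
      ring
    rw [harg1, harg2, ih _ (by omega)]
    have htake : (ts.take (j+1)).reverse = ts[j] :: (ts.take j).reverse := by
      rw [List.take_add_one]
      simp [hjlt]
    have hdrop : ts.drop (ts.length - (j+1)) = ts[ts.length - (j+1)] :: ts.drop (ts.length - j) := by
      have hidx : ts.length - (j+1) + 1 = ts.length - j := by omega
      rw [List.drop_eq_getElem_cons hi2, hidx]
    rw [htake, hdrop, interleave]
    simp

theorem alt_sort_spec : Claim_equal_alt_sort := by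
  intro ts _
  unfold Spec_alt_sort alt_sort alt_sort_alt
  set n := ts.length with hn
  by_cases hpar : (n : Int) % 2 ≠ 0
  · -- odd length
    have hodd : n % 2 = 1 := by omega
    simp only [hodd]
    have hmid : (n : Int) / 2 = ((n / 2 : Nat) : Int) := by
      push_cast
      omega
    have hlt : n / 2 < n := by omega
    have hg : PySem.List.pyGet? ts ((n : Int) / 2) = some ts[n / 2] := by
      rw [hmid, PySem.List.pyGet?_natCast]
      simp only [List.getElem?_eq_getElem hlt]
    have h1 : ((n : Int) / 2 - 1) = ((n / 2 : Nat) : Int) - 1 := by rw [hmid]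
    have h2 : ((n : Int) / 2 + 1) = ((n - n / 2 : Nat) : Int) := by
      push_cast [Nat.cast_sub (by omega : n / 2 ≤ n)]
      omega
    rw [hg, h1, h2, altLoop_eq ts (n / 2) _ (by omega)]
    have hd : n - n / 2 = n / 2 + 1 := by omega
    rw [if_pos hpar, if_pos (show (1:Nat) ≠ 0 by decide), ← hmid, hg, ← hn, hd]
    simp
  · -- even length
    have heven : n % 2 = 0 := by omega
    rw [if_neg hpar, if_neg (show ¬(n % 2 ≠ 0) by omega)]
    have h1 : ((n : Int) / 2 - 1) = ((n / 2 : Nat) : Int) - 1 := by push_cast; omega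
    have h2 : ((n : Int) / 2) = ((n - n / 2 : Nat) : Int) := by
      push_cast [Nat.cast_sub (by omega : n / 2 ≤ n)]
      omega
    show altLoop ts (n : Int) ((n : Int) / 2 - 1) ((n : Int) / 2) [] = _
    rw [h1]
    conv_lhs => rw [h2]
    rw [altLoop_eq ts (n / 2) _ (by omega)]
    have hd : n - n / 2 = n / 2 := by omega
    rw [← hn, hd]
    simp
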